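-- pv_equiv track=rewrite | github.com/gimkuku/Algorithm | KaKaoBlind2018/differbitsmallerthan2.py | solution
-- ===== SOURCE A (Python) =====
-- def solution(numbers):
--     answer = []
--     bin_numbers = []
--     for i in numbers:
--         element= bin(i)
--         list_e = list(element)
--         list_e.insert(2,'0')
--         element = ''.join(list_e)
--         bin_numbers.append(element)
--
--     for i in bin_numbers:
--         for j in range(len(i)-2):
--             if ((i[len(i)-1-j] == '0') and (j == 0)):
--                 list_i = list(i)
--                 list_i[len(i)-1-j] = '1'
--                 i = ''.join(list_i)
--                 break
--             elif ((i[len(i)-1-j] == '0') and (i[len(i)-j-2] != 'b')):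
--                 list_i = list(i)
--                 list_i[len(i)-1-j] = '1'
--                 list_i[len(i)-j] = '0'
--                 i = ''.join(list_i)
--                 break
--             elif ((i[len(i)-1-j] == '0') and (i[len(i)-j-2] == 'b')):
--                 list_i = list(i)
--                 list_i[len(i)-1-j] = '1'
--                 list_i[len(i)-j] = '0'
--                 i = ''.join(list_i)
--                 break
--
--         answer.append(int(i,2))
--
--     return answer
-- ===== SOURCE B (Python) =====
-- def solution(numbers):
--     answer = []
--     for n in numbers:
--         if n % 2 == 0:
--             answer.append(n + 1)
--         else:
--             m = n
--             p = 1
--             while m > 0 and m % 2 == 1: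
--                 m = m // 2
--                 p = p * 2
--             answer.append(n + p // 2)
--     return answer
-- ===== Notes on version B (the rewrite author's own statement) =====
-- stated objective: simpler
-- what changed: B drops A's binary-string construction (bin(), sentinel insert, char scan, int(s,2) reparse) and works on integers directly: even n gives n+1, odd n adds half of the lowest zero-bit power found by halving.
-- outside the precondition, e.g. on solution([-1]): A returns [-5], B returns [-1]
import Mathlib
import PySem

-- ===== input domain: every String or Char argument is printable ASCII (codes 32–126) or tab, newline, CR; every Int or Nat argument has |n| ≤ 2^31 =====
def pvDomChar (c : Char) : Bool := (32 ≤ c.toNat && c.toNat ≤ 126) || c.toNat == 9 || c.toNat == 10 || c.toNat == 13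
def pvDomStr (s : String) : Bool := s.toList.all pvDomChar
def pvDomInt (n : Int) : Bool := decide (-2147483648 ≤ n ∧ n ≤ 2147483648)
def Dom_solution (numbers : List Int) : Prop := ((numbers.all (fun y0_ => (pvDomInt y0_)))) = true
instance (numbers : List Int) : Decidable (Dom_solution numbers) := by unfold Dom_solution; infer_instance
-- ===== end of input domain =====

-- B replaces A's string pipeline (bin(), sentinel insert, char scan, int(s,2)) by direct
-- integer arithmetic: even n -> n+1, odd n -> n + half the lowest zero-bit power (objective: simpler).

-- ===== PORT A =====
-- binary digits of a Nat, most significant first (bin(n) without the '0b'; [] for 0)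
def pyNatBits : Nat → List Char
  | 0 => []
  | n+1 => pyNatBits ((n+1)/2) ++ [if (n+1) % 2 = 1 then '1' else '0']
decreasing_by omega

-- Python bin(i) as a char list: optional '-', then '0b', then digits ('0' for zero)
def pyBin (i : Int) : List Char :=
  (if i < 0 then ['-'] else []) ++ ['0', 'b'] ++ (if i.natAbs = 0 then ['0'] else pyNatBits i.natAbs)

-- A's inner 'for j in range(len(i)-2): ... break' loop; fuel = remaining iterations,
-- j = current index.  Python's indices len(i)-1-j and len(i)-j-2 are nonnegative for every
-- executed j (j ≤ len-3), so the Nat subtractions below are exact.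
def aScan (s : List Char) (j : Nat) : Nat → List Char
  | 0 => s
  | f+1 =>
    let L := s.length
    if (s[L-1-j]?.getD '?') = '0' ∧ j = 0 then
      s.set (L-1-j) '1'
    else if (s[L-1-j]?.getD '?') = '0' ∧ (s[L-j-2]?.getD '?') ≠ 'b' then
      (s.set (L-1-j) '1').set (L-j) '0'
    else if (s[L-1-j]?.getD '?') = '0' ∧ (s[L-j-2]?.getD '?') = 'b' then
      (s.set (L-1-j) '1').set (L-j) '0'
    else
      aScan s (j+1) f

-- int(s, 2): optional sign, optional '0b'/'0B' prefix, binary digits; none = ValueError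
-- (exact on the strings A builds; A raises exactly where this is none, excluded by Pre_).
def parseBin (s : List Char) : Option Int :=
  let p : Int × List Char :=
    match s with
    | '-' :: r => (-1, r)
    | '+' :: r => (1, r)
    | _ => (1, s)
  let s2 : List Char :=
    match p.2 with
    | '0' :: 'b' :: r => r
    | '0' :: 'B' :: r => r
    | _ => p.2
  if s2 ≠ [] ∧ s2.all (fun c => c = '0' ∨ c = '1') then
    some (p.1 * s2.foldl (fun a c => 2*a + (if c = '1' then 1 else 0)) 0)
  else none

def solution (numbers : List Int) : List Int :=
  let bin_numbers := numbers.foldl (fun acc i => acc ++ [PySem.List.insert (pyBin i) 2 '0']) []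
  bin_numbers.foldl (fun acc s => acc ++ [(parseBin (aScan s 0 (s.length - 2))).getD 0]) []

-- ===== PORT B =====
-- 'while m > 0 and m % 2 == 1: m //= 2; p *= 2'
def altLoop (m p : Int) : Int :=
  if h : 0 < m ∧ PySem.Int.mod m 2 = 1 then
    altLoop (PySem.Int.floordiv m 2) (p * 2)
  else p
termination_by m.toNat
decreasing_by
  have h2 : PySem.Int.floordiv m 2 = m / 2 := PySem.Int.floordiv_eq_ediv_of_pos (by omega)
  rw [h2]; omega

def solution_alt (numbers : List Int) : List Int :=
  numbers.foldl
    (fun acc n =>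
      acc ++ [if PySem.Int.mod n 2 = 0 then n + 1 else n + PySem.Int.floordiv (altLoop n 1) 2])
    []

-- ===== PRECONDITION & SPEC =====
-- Pre_ excludes lists containing a negative element: there A's sign-prefixed bin() string breaks
-- its digit surgery — it raises ValueError (e.g. int('-00b101', 2)) for most negatives, and on
-- all-ones negatives returns an accidental value assembled across the misplaced sign ([-1] -> [-5]).
def Pre_solution (numbers : List Int) : Prop := ∀ n ∈ numbers, 0 ≤ n
instance (numbers : List Int) : Decidable (Pre_solution numbers) := by unfold Pre_solution; infer_instance

def pvWitness_solution : List Int := [0, 1, 5, 12]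

def Spec_solution (numbers : List Int) (out : List Int) : Prop := out = solution_alt numbers
instance (numbers : List Int) (out : List Int) : Decidable (Spec_solution numbers out) := by unfold Spec_solution; infer_instance

-- ===== CLAIM (what is proved, stated in full; the proofs are below) =====
def Claim_equal_solution : Prop := ∀ (numbers : List Int), Dom_solution numbers → Pre_solution numbers → Spec_solution numbers (solution numbers)

-- ===== LEMMAS AND PROOFS =====

-- number of trailing one-bits
def tOnes : Nat → Nat
  | n => if n % 2 = 1 then tOnes (n/2) + 1 else 0
termination_by n => n
decreasing_by omega

theorem tOnes_odd (n : Nat) (h : n % 2 = 1) : tOnes n = tOnes (n/2) + 1 := by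
  rw [tOnes, if_pos h]

theorem tOnes_even (n : Nat) (h : ¬ n % 2 = 1) : tOnes n = 0 := by
  rw [tOnes, if_neg h]

-- integer value of a binary digit string, most significant first (the foldl from parseBin)
def bval (ds : List Char) : Int :=
  ds.foldl (fun a c => 2*a + (if c = '1' then 1 else 0)) 0

theorem bval_foldl_shift (ys : List Char) (a : Int) :
    ys.foldl (fun a c => 2*a + (if c = '1' then 1 else 0)) a
      = a * 2 ^ ys.length + bval ys := by
  induction ys generalizing a with
  | nil => simp [bval]
  | cons c ys ih =>
    simp only [List.foldl_cons, List.length_cons, bval] at *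
    rw [ih, ih (2*0 + _)]
    ring

theorem bval_append (xs ys : List Char) :
    bval (xs ++ ys) = bval xs * 2 ^ ys.length + bval ys := by
  simp only [bval, List.foldl_append]
  exact bval_foldl_shift ys _

theorem bval_rep (t : Nat) : bval (List.replicate t '1') = 2 ^ t - 1 := by
  induction t with
  | zero => simp [bval]
  | succ t ih =>
    rw [List.replicate_succ', bval_append, ih]
    simp [bval]
    ring

theorem bval_cons_zero (xs : List Char) : bval ('0' :: xs) = bval xs := by
  simp [bval]

theorem bval_pyNatBits (n : Nat) : bval (pyNatBits n) = (n : Int) := by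
  induction n using Nat.strong_induction_on with
  | _ n ih =>
    match n with
    | 0 => simp [pyNatBits, bval]
    | m+1 =>
      rw [pyNatBits, bval_append, ih ((m+1)/2) (by omega)]
      split_ifs with h
      · rw [show bval ['1'] = 1 from by decide]
        simp only [List.length_cons, List.length_nil]
        omega
      · rw [show bval ['0'] = 0 from by decide]
        simp only [List.length_cons, List.length_nil]
        omega

theorem pyNatBits_binary (n : Nat) :
    ∀ c ∈ pyNatBits n, c = '0' ∨ c = '1' := by
  induction n using Nat.strong_induction_on with
  | _ n ih =>
    match n with
    | 0 => simp [pyNatBits]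
    | m+1 =>
      rw [pyNatBits]
      intro c hc
      rcases List.mem_append.1 hc with h | h
      · exact ih ((m+1)/2) (by omega) c h
      · simp at h; subst h; split_ifs <;> simp

def binDigits (n : Nat) : List Char := if n = 0 then ['0'] else pyNatBits n

theorem binDigits_binary (n : Nat) : ∀ c ∈ binDigits n, c = '0' ∨ c = '1' := by
  unfold binDigits; split_ifs
  · simp
  · exact pyNatBits_binary n

theorem bval_binDigits (n : Nat) : bval (binDigits n) = (n : Int) := by
  unfold binDigits; split_ifs with h
  · subst h; simp [bval]
  · exact bval_pyNatBits n

-- the sentinel-extended digit string decomposes as  pre ++ '0' ++ '1'*(trailing ones)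
theorem decomp (n : Nat) :
    ∃ pre : List Char, '0' :: binDigits n = pre ++ '0' :: List.replicate (tOnes n) '1' := by
  have key : ∀ n : Nat, ∃ pre : List Char,
      '0' :: pyNatBits n = pre ++ '0' :: List.replicate (tOnes n) '1' := by
    intro n
    induction n using Nat.strong_induction_on with
    | _ n ih =>
      match n with
      | 0 => exact ⟨[], by simp [pyNatBits, tOnes_even 0 (by omega)]⟩
      | m+1 =>
        by_cases h : (m+1) % 2 = 1
        · obtain ⟨pre, hp⟩ := ih ((m+1)/2) (by omega)
          refine ⟨pre, ?_⟩
          rw [pyNatBits, if_pos h, tOnes_odd _ h, List.replicate_succ',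
            show ('0' :: (pyNatBits ((m+1)/2) ++ ['1'])) = ('0' :: pyNatBits ((m+1)/2)) ++ ['1'] by simp,
            hp]
          simp
        · refine ⟨'0' :: pyNatBits ((m+1)/2), ?_⟩
          rw [pyNatBits, if_neg h, tOnes_even _ h]
          simp
  unfold binDigits; split_ifs with h
  · exact ⟨['0'], by simp [h, tOnes_even 0 (by omega)]⟩
  · exact key n

-- A's scan on a string '0b' ++ pre ++ '0' ++ '1'*t: indexing/patching around position pre.length+2
theorem get_mid (pre tail : List Char) (x : Char) :
    ('0' :: 'b' :: (pre ++ x :: tail))[pre.length + 2]? = some x := by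
  rw [show ('0' :: 'b' :: (pre ++ x :: tail)) = ('0' :: 'b' :: pre) ++ x :: tail by simp]
  rw [List.getElem?_append_right (by simp)]
  simp

theorem set_mid (pre tail : List Char) (x v : Char) :
    ('0' :: 'b' :: (pre ++ x :: tail)).set (pre.length + 2) v = '0' :: 'b' :: (pre ++ v :: tail) := by
  rw [show ('0' :: 'b' :: (pre ++ x :: tail)) = ('0' :: 'b' :: pre) ++ x :: tail by simp]
  rw [List.set_append_right _ _ (by simp)]
  simp

-- A's inner loop, started at j = c on '0b' ++ pre ++ '0' ++ '1'*(c+k), flips the '0' and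
-- (when it is not the last position) zeroes its right neighbour.
theorem scan_lemma : ∀ (k c f : Nat) (pre : List Char), k < f →
    aScan ('0' :: 'b' :: (pre ++ '0' :: List.replicate (c + k) '1')) c f
      = '0' :: 'b' :: (if c + k = 0 then pre ++ ['1']
          else pre ++ '1' :: '0' :: List.replicate (c + k - 1) '1') := by
  intro k
  induction k with
  | zero =>
    intro c f pre hf
    obtain ⟨f', rfl⟩ : ∃ f', f = f' + 1 := ⟨f - 1, by omega⟩
    simp only [Nat.add_zero]
    rw [aScan]
    rw [show ('0' :: 'b' :: (pre ++ '0' :: List.replicate c '1')).length - 1 - c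
        = pre.length + 2 from by simp; omega]
    rw [get_mid]
    simp only [Option.getD_some]
    by_cases hc : c = 0
    · subst hc
      rw [if_pos (rfl : (0:Nat) = 0)]
      rw [show List.replicate 0 '1' = ([] : List Char) from rfl]
      split_ifs with h1 h2 h3 <;>
        first
          | exact absurd (by simp) h1
          | rw [set_mid]
    · rw [if_neg hc]
      obtain ⟨c', rfl⟩ : ∃ c', c = c' + 1 := ⟨c - 1, by omega⟩
      rw [show ('0' :: 'b' :: (pre ++ '0' :: List.replicate (c' + 1) '1')).length - (c' + 1)
          = pre.length + 3 from by simp; omega]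
      have hres :
          (('0' :: 'b' :: (pre ++ '0' :: List.replicate (c' + 1) '1')).set (pre.length + 2) '1').set
              (pre.length + 3) '0'
            = '0' :: 'b' :: (pre ++ '1' :: '0' :: List.replicate c' '1') := by
        rw [set_mid]
        rw [show ('0' :: 'b' :: (pre ++ '1' :: List.replicate (c' + 1) '1'))
            = '0' :: 'b' :: ((pre ++ ['1']) ++ '1' :: List.replicate c' '1') from by
          simp [List.replicate_succ]]
        rw [show pre.length + 3 = (pre ++ ['1']).length + 2 from by simp]
        rw [set_mid]
        simp
      split_ifs with h1 h2 h3 h4 <;> simp_all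
  | succ k ih =>
    intro c f pre hf
    obtain ⟨f', rfl⟩ : ∃ f', f = f' + 1 := ⟨f - 1, by omega⟩
    rw [aScan]
    have hsplitrep : ('0' :: 'b' :: (pre ++ '0' :: List.replicate (c + (k + 1)) '1'))
        = '0' :: 'b' :: ((pre ++ '0' :: List.replicate k '1') ++ '1' :: List.replicate c '1') := by
      rw [show c + (k + 1) = k + (c + 1) from by omega, List.replicate_add]
      simp [List.replicate_succ]
    have hget1 : ('0' :: 'b' :: (pre ++ '0' :: List.replicate (c + (k + 1)) '1'))[pre.length
        + k + 3]? = some '1' := by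
      rw [hsplitrep]
      rw [show pre.length + k + 3 = (pre ++ '0' :: List.replicate k '1').length + 2 from by
        simp; omega]
      rw [get_mid]
    rw [show ('0' :: 'b' :: (pre ++ '0' :: List.replicate (c + (k + 1)) '1')).length - 1 - c
        = pre.length + k + 3 from by simp; omega]
    rw [hget1]
    simp only [Option.getD_some]
    rw [if_neg (by simp), if_neg (by simp), if_neg (by simp)]
    have := ih (c + 1) f' pre (by omega)
    rw [show (c + 1) + k = c + (k + 1) from by omega] at this
    rw [this]

-- parseBin on A's result strings
theorem parseBin_0b (ds : List Char) (h1 : ds ≠ []) (h2 : ∀ c ∈ ds, c = '0' ∨ c = '1') :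
    parseBin ('0' :: 'b' :: ds) = some (bval ds) := by
  have : (ds.all (fun c => c = '0' ∨ c = '1')) = true := by simp_all
  simp [parseBin, h1, bval]
  intro x hx hx0
  rcases h2 x hx with h | h
  · exact absurd h hx0
  · exact h

-- B's loop computes 2^(trailing ones)
theorem altLoop_eq : ∀ a : Nat, ∀ p : Int, altLoop (a : Int) p = p * 2 ^ tOnes a := by
  intro a
  induction a using Nat.strong_induction_on with
  | _ a ih =>
    intro p
    have hm : PySem.Int.mod (a:Int) 2 = ((a % 2 : Nat) : Int) := by
      exact_mod_cast PySem.Int.mod_natCast a 2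
    have hd : PySem.Int.floordiv (a:Int) 2 = ((a / 2 : Nat) : Int) := by
      exact_mod_cast PySem.Int.floordiv_natCast a 2
    rw [altLoop]
    by_cases h : 0 < a ∧ a % 2 = 1
    · rw [dif_pos (by
        refine ⟨by exact_mod_cast h.1, ?_⟩
        rw [hm, h.2]; norm_num)]
      rw [hd, ih (a/2) (by omega) (p*2), tOnes_odd a h.2]
      ring
    · rw [dif_neg (by
        intro ⟨h1, h2⟩
        apply h
        refine ⟨by exact_mod_cast h1, ?_⟩
        rw [hm] at h2
        exact_mod_cast h2)]
      by_cases ha : a = 0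
      · subst ha; rw [tOnes_even 0 (by omega)]; ring
      · rw [tOnes_even a (by
          intro hodd
          exact h ⟨by omega, hodd⟩)]
        ring

-- the per-element equality, for nonnegative i
theorem step_eq (i : Int) (hi : 0 ≤ i) :
    (parseBin (aScan (PySem.List.insert (pyBin i) 2 '0') 0
        ((PySem.List.insert (pyBin i) 2 '0').length - 2))).getD 0
      = if PySem.Int.mod i 2 = 0 then i + 1 else i + PySem.Int.floordiv (altLoop i 1) 2 := by
  obtain ⟨n, rfl⟩ : ∃ n : Nat, i = (n : Int) := ⟨i.toNat, (Int.toNat_of_nonneg hi).symm⟩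
  have hbin : pyBin (n : Int) = '0' :: 'b' :: binDigits n := by
    unfold pyBin binDigits
    rw [if_neg (by omega)]
    simp
  have hins : PySem.List.insert (pyBin (n:Int)) 2 '0' = '0' :: 'b' :: '0' :: binDigits n := by
    rw [PySem.List.insert_ofNat _ 2 _ (by rw [hbin]; simp)]
    rw [hbin]
    rfl
  obtain ⟨pre, hpre⟩ := decomp n
  have hlen2 : ('0' :: 'b' :: '0' :: binDigits n).length - 2 = pre.length + 1 + tOnes n := by
    have := congrArg List.length hpre
    simp at this
    simp
    omega
  have hmod : PySem.Int.mod (n:Int) 2 = ((n % 2 : Nat) : Int) := by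
    exact_mod_cast PySem.Int.mod_natCast n 2
  have hn : ((n:Int)) = bval pre * 2 ^ (tOnes n + 1) + (2 ^ tOnes n - 1) := by
    have h1 : bval ('0' :: binDigits n) = (n : Int) := by
      rw [bval_cons_zero, bval_binDigits]
    rw [hpre, bval_append, bval_cons_zero, bval_rep] at h1
    simp only [List.length_cons, List.length_replicate] at h1
    exact h1.symm
  have hpreb : ∀ c ∈ pre, c = '0' ∨ c = '1' := by
    intro c hc
    have hmem : c ∈ '0' :: binDigits n := by
      rw [hpre]; exact List.mem_append_left _ hc
    rcases List.mem_cons.1 hmem with h | h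
    · exact Or.inl h
    · exact binDigits_binary n c h
  rw [hins, hlen2]
  rw [show ('0' :: 'b' :: '0' :: binDigits n) = '0' :: 'b' :: ('0' :: binDigits n) by rfl, hpre]
  have hsc := scan_lemma (tOnes n) 0 (pre.length + 1 + tOnes n) pre (by omega)
  simp only [Nat.zero_add] at hsc
  rw [hsc]
  by_cases ht : tOnes n = 0
  · -- n is even: the scan flips the last digit, giving n+1
    have hev : n % 2 = 0 := by
      by_contra hodd
      have h1 : n % 2 = 1 := by omega
      rw [tOnes_odd n h1] at ht; omega
    rw [if_pos ht]
    rw [parseBin_0b _ (by simp) (by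
      intro c hc
      rcases List.mem_append.1 hc with h | h
      · exact hpreb c h
      · simp at h; subst h; simp)]
    rw [Option.getD_some]
    rw [hmod, hev]
    rw [if_pos (by norm_num)]
    rw [bval_append, show bval ['1'] = 1 from by decide]
    simp only [List.length_cons, List.length_nil]
    rw [ht] at hn
    simp only [pow_succ, pow_zero] at hn
    norm_num at hn
    omega
  · -- n is odd: the scan flips the lowest 0-bit and clears its right neighbour: n + 2^(t-1)
    have hodd : n % 2 = 1 := by
      by_contra hev
      exact ht (tOnes_even n hev)
    obtain ⟨t', htt⟩ : ∃ t', tOnes n = t' + 1 := ⟨tOnes n - 1, by omega⟩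
    rw [if_neg ht]
    rw [parseBin_0b _ (by simp) (by
      intro c hc
      rcases List.mem_append.1 hc with h | h
      · exact hpreb c h
      · rcases List.mem_cons.1 h with h1 | h1
        · exact Or.inr h1
        · rcases List.mem_cons.1 h1 with h2 | h2
          · exact Or.inl h2
          · exact Or.inr (List.eq_of_mem_replicate h2))]
    rw [Option.getD_some]
    rw [hmod, hodd]
    rw [if_neg (by norm_num)]
    rw [altLoop_eq n 1, htt, one_mul]
    rw [show ((2:Int) ^ (t' + 1)) = 2 ^ t' * 2 from pow_succ 2 t']
    rw [PySem.Int.floordiv_eq_ediv_of_pos (by omega), Int.mul_ediv_cancel _ (by omega)]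
    rw [htt] at hn
    simp only [Nat.add_sub_cancel]
    rw [bval_append]
    rw [show ('1' :: '0' :: List.replicate t' '1') = ['1','0'] ++ List.replicate t' '1' from rfl,
      bval_append, bval_rep, show bval ['1','0'] = 2 from by decide]
    simp only [List.length_cons, List.length_nil, List.length_append, List.length_replicate]
    rw [hn]
    simp only [pow_succ]
    ring

-- ===== VERDICT (by name: the statement is the Claim_ definition above) =====
theorem solution_spec : Claim_equal_solution := by
  intro numbers _ hpre
  unfold Spec_solution solution solution_alt
  simp only [PySem.List.foldl_append_singleton_eq_map, List.nil_append, List.map_map]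
  apply List.map_congr_left
  intro i hi
  exact step_eq i (hpre i hi)
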